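-- pv_equiv track=rewrite | github.com/mehbooba/REL_PONFHG | modified_REL.py | filter_rows_with_non_empty_columns
-- ===== SOURCE A (Python) =====
-- def filter_rows_with_non_empty_columns(matrix, column_indices,unum):
--     result_rows = {}
--
--     for i,row in enumerate(matrix):
--     	if i!=unum:
--         	non_empty_count = sum(1 for col_idx in column_indices if row[col_idx] >0)
--         	if non_empty_count > 0:
--             		result_rows[i]=non_empty_count
--
--     return result_rows
-- ===== SOURCE B (Python) =====
-- def filter_rows_with_non_empty_columns(matrix, column_indices, unum):
--     # Column-major traversal: accumulate per-row counts one column at a time,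
--     # then emit rows in ascending index order.
--     counts = {}
--     for c in column_indices:
--         for i, row in enumerate(matrix):
--             if i != unum and row[c] > 0:
--                 counts[i] = counts.get(i, 0) + 1
--     return {i: counts[i] for i in sorted(counts)}
-- ===== Notes on version B (the rewrite author's own statement) =====
-- stated objective: alternative
-- what changed: Row-major per-row counting with conditional dict insertion is replaced by a column-major traversal that accumulates a counts dict one column at a time and then emits the surviving rows in sorted row-index order.
import Mathlib
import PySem

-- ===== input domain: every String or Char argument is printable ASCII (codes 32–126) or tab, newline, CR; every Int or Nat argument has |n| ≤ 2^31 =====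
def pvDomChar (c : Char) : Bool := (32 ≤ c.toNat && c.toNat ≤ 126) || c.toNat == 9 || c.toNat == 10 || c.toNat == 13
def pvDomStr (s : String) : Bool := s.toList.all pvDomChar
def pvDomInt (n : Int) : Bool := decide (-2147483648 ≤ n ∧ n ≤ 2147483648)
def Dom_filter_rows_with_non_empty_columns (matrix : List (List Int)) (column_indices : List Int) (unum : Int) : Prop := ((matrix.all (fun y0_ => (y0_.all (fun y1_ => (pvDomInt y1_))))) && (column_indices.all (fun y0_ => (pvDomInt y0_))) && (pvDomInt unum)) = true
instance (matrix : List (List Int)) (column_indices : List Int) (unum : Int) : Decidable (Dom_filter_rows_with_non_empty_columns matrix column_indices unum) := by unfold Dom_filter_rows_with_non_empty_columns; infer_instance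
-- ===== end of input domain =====

-- B replaces A's row-major counting loop by a column-major accumulation into a counts
-- dict followed by an emission of the surviving rows in sorted row-index order
-- (objective: alternative decomposition, same asymptotic cost).

-- ===== PORT A =====
def filter_rows_with_non_empty_columns (matrix : List (List Int)) (column_indices : List Int) (unum : Int) : List (Int × Int) :=
  ((PySem.List.enumerate matrix).foldl
    (fun d p =>
      if p.1 ≠ unum then
        let non_empty_count :=
          column_indices.foldl (fun s c => if PySem.List.pyGetD p.2 c 0 > 0 then s + 1 else s) 0
        if non_empty_count > 0 then d.insert p.1 non_empty_count else d
      else d)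
    (PySem.Dict.empty : PySem.Dict Int Int)).items

-- ===== PORT B =====
def filter_rows_with_non_empty_columns_alt (matrix : List (List Int)) (column_indices : List Int) (unum : Int) : List (Int × Int) :=
  let counts : PySem.Dict Int Int :=
    column_indices.foldl
      (fun d c =>
        (PySem.List.enumerate matrix).foldl
          (fun d p => if p.1 ≠ unum ∧ PySem.List.pyGetD p.2 c 0 > 0 then d.modify p.1 0 (· + 1) else d)
          d)
      PySem.Dict.empty
  (PySem.List.sorted counts.keys (fun x => x)).map (fun i => (i, counts.getD i 0))

-- ===== PRECONDITION & SPEC =====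
-- Pre_ excludes exactly the inputs on which A raises IndexError: some row other than
-- row unum is indexed by a column index outside range(-len(row), len(row)).
def Pre_filter_rows_with_non_empty_columns (matrix : List (List Int)) (column_indices : List Int) (unum : Int) : Prop :=
  ∀ p ∈ PySem.List.enumerate matrix, p.1 ≠ unum → ∀ c ∈ column_indices, PySem.Raise.InRange p.2.length c
instance (matrix : List (List Int)) (column_indices : List Int) (unum : Int) : Decidable (Pre_filter_rows_with_non_empty_columns matrix column_indices unum) := by unfold Pre_filter_rows_with_non_empty_columns; infer_instance

def pvWitness_filter_rows_with_non_empty_columns : List (List Int) × List Int × Int :=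
  ([[1, 0], [0, 2], [3, -1]], [0, 1], 1)

def Spec_filter_rows_with_non_empty_columns (matrix : List (List Int)) (column_indices : List Int) (unum : Int) (out : List (Int × Int)) : Prop := out = filter_rows_with_non_empty_columns_alt matrix column_indices unum
instance (matrix : List (List Int)) (column_indices : List Int) (unum : Int) (out : List (Int × Int)) : Decidable (Spec_filter_rows_with_non_empty_columns matrix column_indices unum out) := by unfold Spec_filter_rows_with_non_empty_columns; infer_instance

-- ===== CLAIM (what is proved, stated in full; the proofs are below) =====
def Claim_equal_filter_rows_with_non_empty_columns : Prop := ∀ (matrix : List (List Int)) (column_indices : List Int) (unum : Int), Dom_filter_rows_with_non_empty_columns matrix column_indices unum → Pre_filter_rows_with_non_empty_columns matrix column_indices unum → Spec_filter_rows_with_non_empty_columns matrix column_indices unum (filter_rows_with_non_empty_columns matrix column_indices unum)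

-- ===== LEMMAS AND PROOFS =====

-- per-row count of positive specified cells, as A computes it
def pvCnt (cols row : List Int) : Int :=
  cols.foldl (fun s c => if PySem.List.pyGetD row c 0 > 0 then s + 1 else s) 0

lemma foldl_cnt (row : List Int) :
    ∀ (cols : List Int) (s : Int),
      cols.foldl (fun s c => if PySem.List.pyGetD row c 0 > 0 then s + 1 else s) s
        = s + (cols.countP (fun c => decide (0 < PySem.List.pyGetD row c 0)) : Int) := by
  intro cols
  induction cols with
  | nil => intro s; simp
  | cons c cols ih =>
    intro s
    simp only [List.foldl_cons, List.countP_cons, ih]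
    by_cases h : 0 < PySem.List.pyGetD row c 0
    · simp [h]; ring
    · simp [h]

lemma pvCnt_eq_countP (cols row : List Int) :
    pvCnt cols row = (cols.countP (fun c => decide (0 < PySem.List.pyGetD row c 0)) : Int) := by
  unfold pvCnt
  rw [foldl_cnt]
  simp

lemma pvCnt_pos_iff (cols row : List Int) :
    0 < pvCnt cols row ↔ ∃ c ∈ cols, 0 < PySem.List.pyGetD row c 0 := by
  rw [pvCnt_eq_countP]
  rw [Int.natCast_pos, List.countP_pos_iff]
  simp

-- A's fold over fresh, pairwise-distinct keys appends its conditional inserts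
lemma A_fold_items (cols : List Int) (unum : Int) :
    ∀ (ps : List (Int × List Int)) (d : PySem.Dict Int Int),
      (∀ p ∈ ps, d.contains p.1 = false) → (ps.map Prod.fst).Nodup →
      (ps.foldl (fun d p =>
          if p.1 ≠ unum then
            let non_empty_count := pvCnt cols p.2
            if non_empty_count > 0 then d.insert p.1 non_empty_count else d
          else d) d).items
        = d.items ++ (ps.filter (fun p => decide (p.1 ≠ unum ∧ 0 < pvCnt cols p.2))).map
            (fun p => (p.1, pvCnt cols p.2)) := by
  intro ps
  induction ps with
  | nil => intro d _ _; simp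
  | cons p ps ih =>
    intro d hfresh hnd
    have hpf : d.contains p.1 = false := hfresh p (by simp)
    have hnd2 : (p.1 :: ps.map Prod.fst).Nodup := by simpa using hnd
    have hnd' : (ps.map Prod.fst).Nodup := (List.nodup_cons.mp hnd2).2
    have hne : ∀ q ∈ ps, q.1 ≠ p.1 := by
      intro q hq h
      exact (List.nodup_cons.mp hnd2).1 (h ▸ List.mem_map_of_mem hq)
    by_cases h1 : p.1 ≠ unum
    · by_cases h2 : 0 < pvCnt cols p.2
      · simp only [List.foldl_cons, List.filter_cons]
        rw [if_pos h1, if_pos (by exact h2)]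
        rw [ih (d.insert p.1 (pvCnt cols p.2))
            (by
              intro q hq
              rw [PySem.Dict.contains_insert]
              simp [hne q hq, hfresh q (List.mem_cons_of_mem _ hq)])
            hnd']
        rw [PySem.Dict.items_insert_of_not_contains d _ hpf]
        simp [h1, h2]
      · simp only [List.foldl_cons, List.filter_cons]
        rw [if_pos h1, if_neg (by exact h2)]
        rw [ih d (fun q hq => hfresh q (List.mem_cons_of_mem _ hq)) hnd']
        simp [h1, h2]
    · simp only [List.foldl_cons, List.filter_cons]
      rw [if_neg h1]
      rw [ih d (fun q hq => hfresh q (List.mem_cons_of_mem _ hq)) hnd']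
      simp [h1]

-- B's inner (per-column) loop: effect on getD
lemma B_inner_getD (unum c : Int) :
    ∀ (ps : List (Int × List Int)) (d : PySem.Dict Int Int) (j : Int),
      ((ps.foldl (fun d p => if p.1 ≠ unum ∧ PySem.List.pyGetD p.2 c 0 > 0 then d.modify p.1 0 (· + 1) else d) d).getD j 0)
        = d.getD j 0 + (ps.countP (fun p => decide (p.1 = j ∧ p.1 ≠ unum ∧ 0 < PySem.List.pyGetD p.2 c 0)) : Int) := by
  intro ps
  induction ps with
  | nil => intro d j; simp
  | cons p ps ih =>
    intro d j
    simp only [List.foldl_cons, List.countP_cons]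
    by_cases hc : p.1 ≠ unum ∧ PySem.List.pyGetD p.2 c 0 > 0
    · rw [if_pos hc, ih]
      rw [PySem.Dict.getD_modify]
      by_cases hj : j = p.1
      · subst hj; simp [hc.1, hc.2]; ring
      · have : ¬ (p.1 = j) := fun h => hj h.symm
        simp [hj, this]
    · rw [if_neg hc, ih]
      have : ¬ (p.1 = j ∧ p.1 ≠ unum ∧ 0 < PySem.List.pyGetD p.2 c 0) := by
        intro ⟨_, h2, h3⟩; exact hc ⟨h2, h3⟩
      simp [this]

-- B's inner loop: effect on contains
lemma B_inner_contains (unum c : Int) :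
    ∀ (ps : List (Int × List Int)) (d : PySem.Dict Int Int) (j : Int),
      ((ps.foldl (fun d p => if p.1 ≠ unum ∧ PySem.List.pyGetD p.2 c 0 > 0 then d.modify p.1 0 (· + 1) else d) d).contains j)
        = (d.contains j || ps.any (fun p => decide (p.1 = j ∧ p.1 ≠ unum ∧ 0 < PySem.List.pyGetD p.2 c 0))) := by
  intro ps
  induction ps with
  | nil => intro d j; simp
  | cons p ps ih =>
    intro d j
    simp only [List.foldl_cons, List.any_cons]
    by_cases hc : p.1 ≠ unum ∧ PySem.List.pyGetD p.2 c 0 > 0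
    · rw [if_pos hc, ih]
      rw [PySem.Dict.contains_modify]
      by_cases hj : j = p.1
      · subst hj; simp [hc.1, hc.2]
      · have hb : (j == p.1) = false := beq_eq_false_iff_ne.mpr hj
        have : ¬ (p.1 = j) := fun h => hj h.symm
        simp [hb, this]
    · rw [if_neg hc, ih]
      have : ¬ (p.1 = j ∧ p.1 ≠ unum ∧ 0 < PySem.List.pyGetD p.2 c 0) := by
        intro ⟨_, h2, h3⟩; exact hc ⟨h2, h3⟩
      simp [this]

-- B's inner loop keeps keys Nodup
lemma B_inner_nodup (unum c : Int) :
    ∀ (ps : List (Int × List Int)) (d : PySem.Dict Int Int), d.keys.Nodup →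
      ((ps.foldl (fun d p => if p.1 ≠ unum ∧ PySem.List.pyGetD p.2 c 0 > 0 then d.modify p.1 0 (· + 1) else d) d).keys.Nodup) := by
  intro ps
  induction ps with
  | nil => intro d hd; simpa
  | cons p ps ih =>
    intro d hd
    simp only [List.foldl_cons]
    by_cases hc : p.1 ≠ unum ∧ PySem.List.pyGetD p.2 c 0 > 0
    · rw [if_pos hc]
      exact ih _ (by rw [PySem.Dict.keys_modify]; exact PySem.Dict.nodup_keys_insert _ _ _ hd)
    · rw [if_neg hc]; exact ih d hd

-- outer loop over columns: getD
lemma B_outer_getD (unum : Int) (ps : List (Int × List Int)) :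
    ∀ (cols : List Int) (d : PySem.Dict Int Int) (j : Int),
      ((cols.foldl (fun d c => ps.foldl (fun d p => if p.1 ≠ unum ∧ PySem.List.pyGetD p.2 c 0 > 0 then d.modify p.1 0 (· + 1) else d) d) d).getD j 0)
        = d.getD j 0 + (cols.map (fun c => (ps.countP (fun p => decide (p.1 = j ∧ p.1 ≠ unum ∧ 0 < PySem.List.pyGetD p.2 c 0)) : Int))).sum := by
  intro cols
  induction cols with
  | nil => intro d j; simp
  | cons c cols ih =>
    intro d j
    simp only [List.foldl_cons, List.map_cons, List.sum_cons]
    rw [ih, B_inner_getD]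
    ring

-- outer loop over columns: contains
lemma B_outer_contains (unum : Int) (ps : List (Int × List Int)) :
    ∀ (cols : List Int) (d : PySem.Dict Int Int) (j : Int),
      ((cols.foldl (fun d c => ps.foldl (fun d p => if p.1 ≠ unum ∧ PySem.List.pyGetD p.2 c 0 > 0 then d.modify p.1 0 (· + 1) else d) d) d).contains j)
        = (d.contains j || cols.any (fun c => ps.any (fun p => decide (p.1 = j ∧ p.1 ≠ unum ∧ 0 < PySem.List.pyGetD p.2 c 0)))) := by
  intro cols
  induction cols with
  | nil => intro d j; simp
  | cons c cols ih =>
    intro d j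
    simp only [List.foldl_cons, List.any_cons]
    rw [ih, B_inner_contains]
    simp [Bool.or_assoc]

-- outer loop keeps keys Nodup
lemma B_outer_nodup (unum : Int) (ps : List (Int × List Int)) :
    ∀ (cols : List Int) (d : PySem.Dict Int Int), d.keys.Nodup →
      ((cols.foldl (fun d c => ps.foldl (fun d p => if p.1 ≠ unum ∧ PySem.List.pyGetD p.2 c 0 > 0 then d.modify p.1 0 (· + 1) else d) d) d).keys.Nodup) := by
  intro cols
  induction cols with
  | nil => intro d hd; simpa
  | cons c cols ih =>
    intro d hd
    simp only [List.foldl_cons]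
    exact ih _ (B_inner_nodup unum c ps d hd)

-- countP of a key-selecting predicate on a list with distinct firsts
lemma countP_unique (j unum c : Int) :
    ∀ (ps : List (Int × List Int)), (ps.map Prod.fst).Nodup →
      ∀ p ∈ ps, p.1 = j →
      ps.countP (fun q => decide (q.1 = j ∧ q.1 ≠ unum ∧ 0 < PySem.List.pyGetD q.2 c 0))
        = if (p.1 ≠ unum ∧ 0 < PySem.List.pyGetD p.2 c 0) then 1 else 0 := by
  intro ps
  induction ps with
  | nil => intro _ p hp; simp at hp
  | cons q ps ih =>
    intro hnd p hp hpj
    have hnd2 : (q.1 :: ps.map Prod.fst).Nodup := by simpa using hnd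
    have hq1 : q.1 ∉ ps.map Prod.fst := (List.nodup_cons.mp hnd2).1
    have hnd' : (ps.map Prod.fst).Nodup := (List.nodup_cons.mp hnd2).2
    rcases List.mem_cons.mp hp with h | h
    · subst h
      simp only [List.countP_cons]
      have hz : ps.countP (fun q' => decide (q'.1 = j ∧ q'.1 ≠ unum ∧ 0 < PySem.List.pyGetD q'.2 c 0)) = 0 := by
        apply List.countP_eq_zero.mpr
        intro q' hq'
        simp only [decide_eq_true_eq]
        intro ⟨h1, _, _⟩
        have : q'.1 ∈ ps.map Prod.fst := List.mem_map_of_mem hq'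
        rw [h1, ← hpj] at this
        exact hq1 this
      rw [hz]
      by_cases hb : p.1 ≠ unum ∧ 0 < PySem.List.pyGetD p.2 c 0
      · simp [hpj, hb.2]
      · simp only [decide_eq_true_eq]
        rw [if_neg hb, if_neg (by intro ⟨_, h2, h3⟩; exact hb ⟨h2, h3⟩)]
    · have hq : q.1 ≠ j := by
        intro he
        exact hq1 (by rw [he, ← hpj]; exact List.mem_map_of_mem h)
      simp only [List.countP_cons]
      rw [ih hnd' p h hpj]
      simp [hq]

lemma sum_map_ite (cols : List Int) (Q : Int → Prop) [DecidablePred Q] :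
    (cols.map (fun c => if Q c then (1 : Int) else 0)).sum = (cols.countP (fun c => decide (Q c)) : Int) := by
  induction cols with
  | nil => simp
  | cons c cols ih =>
    simp only [List.map_cons, List.sum_cons, List.countP_cons, ih]
    by_cases h : Q c
    · simp [h]; ring
    · simp [h]

-- enumerate's firsts are Nodup
lemma enum_fst_nodup (matrix : List (List Int)) :
    ((PySem.List.enumerate matrix).map Prod.fst).Nodup := by
  have := PySem.List.pairwise_lt_enumerate matrix 0
  have hm : ((PySem.List.enumerate matrix).map Prod.fst).Pairwise (· < ·) :=
    List.pairwise_map.mpr this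
  exact hm.imp (fun h => ne_of_lt h)

-- ===== VERDICT (by name: the statement is the Claim_ definition above) =====
theorem filter_rows_with_non_empty_columns_spec : Claim_equal_filter_rows_with_non_empty_columns := by
  intro matrix cols unum _ _
  unfold Spec_filter_rows_with_non_empty_columns
  unfold filter_rows_with_non_empty_columns filter_rows_with_non_empty_columns_alt
  set ps := PySem.List.enumerate matrix with hps
  have hnd : (ps.map Prod.fst).Nodup := enum_fst_nodup matrix
  -- name B's counts dict
  set counts : PySem.Dict Int Int :=
    cols.foldl
      (fun d c => ps.foldl
        (fun d p => if p.1 ≠ unum ∧ PySem.List.pyGetD p.2 c 0 > 0 then d.modify p.1 0 (· + 1) else d) d)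
      PySem.Dict.empty with hcounts
  -- A's result
  have hA : (ps.foldl (fun d p =>
        if p.1 ≠ unum then
          let non_empty_count := pvCnt cols p.2
          if non_empty_count > 0 then d.insert p.1 non_empty_count else d
        else d) (PySem.Dict.empty : PySem.Dict Int Int)).items
      = (ps.filter (fun p => decide (p.1 ≠ unum ∧ 0 < pvCnt cols p.2))).map
          (fun p => (p.1, pvCnt cols p.2)) := by
    rw [A_fold_items cols unum ps PySem.Dict.empty (fun p _ => PySem.Dict.contains_empty p.1) hnd]
    simp [PySem.Dict.empty]
  -- getD of counts at a live row index
  have hgetD : ∀ p ∈ ps, p.1 ≠ unum → counts.getD p.1 0 = pvCnt cols p.2 := by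
    intro p hp hpu
    rw [hcounts, B_outer_getD]
    have hmap : cols.map (fun c => (ps.countP (fun q => decide (q.1 = p.1 ∧ q.1 ≠ unum ∧ 0 < PySem.List.pyGetD q.2 c 0)) : Int))
        = cols.map (fun c => if (0 < PySem.List.pyGetD p.2 c 0) then (1 : Int) else 0) := by
      apply List.map_congr_left
      intro c _
      rw [countP_unique p.1 unum c ps hnd p hp rfl]
      by_cases h : 0 < PySem.List.pyGetD p.2 c 0
      · simp [h, hpu]
      · simp [h]
    rw [hmap, sum_map_ite, pvCnt_eq_countP]
    simp
  -- membership in counts.keys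
  have hmem : ∀ j : Int, j ∈ counts.keys ↔
      ∃ p ∈ ps, p.1 = j ∧ p.1 ≠ unum ∧ 0 < pvCnt cols p.2 := by
    intro j
    rw [← PySem.Dict.contains_iff_mem_keys, hcounts, B_outer_contains]
    simp only [PySem.Dict.contains_empty, Bool.false_or, List.any_eq_true, decide_eq_true_eq]
    constructor
    · rintro ⟨c, hc, p, hp, h1, h2, h3⟩
      exact ⟨p, hp, h1, h2, (pvCnt_pos_iff cols p.2).mpr ⟨c, hc, h3⟩⟩
    · rintro ⟨p, hp, h1, h2, h3⟩
      obtain ⟨c, hc, h4⟩ := (pvCnt_pos_iff cols p.2).mp h3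
      exact ⟨c, hc, p, hp, h1, h2, h4⟩
  -- K: A's key list
  set F := (ps.filter (fun p => decide (p.1 ≠ unum ∧ 0 < pvCnt cols p.2))) with hF
  set K := F.map Prod.fst with hK
  have hKnd : K.Nodup := by
    apply List.Nodup.sublist (List.Sublist.map Prod.fst List.filter_sublist) hnd
  have hknd : counts.keys.Nodup := by
    rw [hcounts]
    exact B_outer_nodup unum ps cols PySem.Dict.empty PySem.Dict.nodup_keys_empty
  have hKmem : ∀ j : Int, j ∈ K ↔ ∃ p ∈ ps, p.1 = j ∧ p.1 ≠ unum ∧ 0 < pvCnt cols p.2 := by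
    intro j
    rw [hK, List.mem_map]
    constructor
    · rintro ⟨p, hp, rfl⟩
      have hmem' := List.mem_filter.mp hp
      have hcond := (decide_eq_true_iff).mp hmem'.2
      exact ⟨p, hmem'.1, rfl, hcond.1, hcond.2⟩
    · rintro ⟨p, hp, h1, h2, h3⟩
      exact ⟨p, List.mem_filter.mpr ⟨hp, (decide_eq_true_iff).mpr ⟨h2, h3⟩⟩, h1⟩
  have hperm : K.Perm counts.keys := by
    rw [List.perm_ext_iff_of_nodup hKnd hknd]
    intro j; rw [hKmem, hmem]
  have hKpw : K.Pairwise (fun a b => (fun x => x) a < (fun x => x) b) := by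
    rw [hK]
    apply List.pairwise_map.mpr
    exact List.Pairwise.sublist List.filter_sublist (by rw [hps]; exact PySem.List.pairwise_lt_enumerate matrix 0)
  have hsorted : PySem.List.sorted counts.keys (fun x => x) = K :=
    PySem.List.sorted_eq_of_perm_of_pairwise_lt counts.keys K (fun x => x) hperm hKpw
  have goal2 : F.map (fun p => (p.1, pvCnt cols p.2))
      = (PySem.List.sorted counts.keys (fun x => x)).map (fun i => (i, counts.getD i 0)) := by
    rw [hsorted, hK, List.map_map]
    apply List.map_congr_left
    intro p hp
    have hmem' := List.mem_filter.mp hp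
    have hcond := (decide_eq_true_iff).mp hmem'.2
    simp only [Function.comp]
    rw [hgetD p hmem'.1 hcond.1]
  exact hA.trans goal2
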